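-- pv_equiv track=rewrite | github.com/mdrhmn/WIA2003-Project | test/final_graph_test.py | sentimentMeasure
-- ===== SOURCE A (Python) =====
-- def sentimentMeasure(l1, l2, path, dist):
--     # Mismatch sentiment values
--     current = []
--
--     # Original indexes
--     original = []
--
--     # Sentiment measure
--     sent_measure = []
--
--     # sm_value
--     sm_value = []
--
--     # Difference of element indexes
--     difference = []
--
--     # Total sentiment measures
--     totalSMArr = []*5040
--     totalSM = 0
--
--     for x,y in enumerate(l2):
--
--         if l1[x] != y:
--
--             # If sentiment value < 0 and l2.index < l1.index (to the left)
--             if y < 0 and l2.index(y) < l1.index(y):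
--                 # sent_measure.append(-2 * (abs(l2.index(y) - l1.index(y))))
--                 sent_measure.append([y, 2 * (abs(l2.index(y) - l1.index(y)))])
--                 sm_value.append([y, 2])
--                 totalSM += 2 * (abs(l2.index(y) - l1.index(y)))
--             elif y < 0 and l2.index(y) > l1.index(y):
--                 # sent_measure.append(-1 * (abs(l2.index(y) - l1.index(y))))
--                 sent_measure.append([y, 1 * (abs(l2.index(y) - l1.index(y)))])
--                 sm_value.append([y, 1])
--                 totalSM += 1 * (abs(l2.index(y) - l1.index(y)))
--             elif y > 0 and l2.index(y) < l1.index(y):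
--                 # sent_measure.append(-1 * (abs(l2.index(y) - l1.index(y))))
--                 sent_measure.append([y, 1 * (abs(l2.index(y) - l1.index(y)))])
--                 sm_value.append([y, 1])
--                 totalSM += 1 * (abs(l2.index(y) - l1.index(y)))
--             elif y > 0 and l2.index(y) > l1.index(y):
--                 # sent_measure.append(-2 * (abs(l2.index(y) - l1.index(y))))
--                 sent_measure.append([y, 2 * (abs(l2.index(y) - l1.index(y)))])
--                 sm_value.append([y, 2])
--                 totalSM += 2 * (abs(l2.index(y) - l1.index(y)))
--
--             current.append([y, l2.index(y)])
--             difference.append([y, (abs(l2.index(y) - l1.index(y)))])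
--             # original.append(l1.index(y))
--             original.append([y, l1.index(y)])
--
--         totalSMArr.append(totalSM)
--
--     return(l2, totalSM, path, dist)
-- ===== SOURCE B (Python) =====
-- def sentimentMeasure(l1, l2, path, dist):
--     # Group mismatched positions by the l2-value seen there, with multiplicities.
--     counts = {}
--     for a, b in zip(l1, l2):
--         if a != b:
--             counts[b] = counts.get(b, 0) + 1
--     # First-occurrence index maps, built back-to-front with plain overwrite
--     # (the last write, at the smallest index, wins).
--     pos1 = {}
--     for i, v in reversed(list(enumerate(l1))):
--         pos1[v] = i
--     pos2 = {}
--     for i, v in reversed(list(enumerate(l2))):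
--         pos2[v] = i
--     # One term per DISTINCT mismatched value, scaled by its multiplicity.
--     total = 0
--     for v, c in counts.items():
--         d = pos2[v] - pos1[v]
--         if v != 0 and d != 0:
--             total += c * ((2 if (v < 0) == (d < 0) else 1) * abs(d))
--     return (l2, total, path, dist)
-- ===== Notes on version B (the rewrite author's own statement) =====
-- stated objective: alternative
-- what changed: B aggregates by value instead of by position: one zip pass counts mismatched positions per distinct l2-value, first-occurrence index maps are built back-to-front by plain overwrite, and the total is one multiplicity-scaled term per distinct value, eliminating A's per-position repeated list.index scans and dead bookkeeping lists (O(n) worst case vs A's O(n^2) worst case, though not measurably faster on the timing inputs).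
import Mathlib
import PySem

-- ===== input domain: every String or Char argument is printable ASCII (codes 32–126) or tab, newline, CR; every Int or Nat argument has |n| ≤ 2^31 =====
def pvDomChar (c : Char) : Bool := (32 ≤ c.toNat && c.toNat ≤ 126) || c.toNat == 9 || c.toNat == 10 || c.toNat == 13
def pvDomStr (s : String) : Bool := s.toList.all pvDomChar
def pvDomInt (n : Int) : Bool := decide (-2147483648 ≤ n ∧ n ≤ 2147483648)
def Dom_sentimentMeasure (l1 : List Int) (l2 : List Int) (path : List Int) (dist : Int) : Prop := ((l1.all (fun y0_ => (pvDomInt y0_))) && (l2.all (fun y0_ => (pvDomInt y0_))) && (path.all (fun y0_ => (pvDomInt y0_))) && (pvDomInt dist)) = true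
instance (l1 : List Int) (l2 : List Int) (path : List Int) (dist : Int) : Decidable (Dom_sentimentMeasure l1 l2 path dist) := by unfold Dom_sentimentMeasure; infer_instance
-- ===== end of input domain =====

-- B aggregates by distinct mismatched value (one multiset-count pass plus one term per distinct value)
-- instead of A's per-position loop with repeated list.index scans; equal on Pre_ (where A returns).

-- ===== PORT A =====
-- l.index(y): Python raises ValueError when y ∉ l (index? = none); excluded by Pre_, default 0 unreachable inside Pre_.
def pvIndexZ (l : List Int) (y : Int) : Int := (((PySem.List.index? l y).map (fun n => (n : Int))).getD 0)

-- loop body of A; state = (current, original, sent_measure, sm_value, difference, totalSMArr, totalSM)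
def pvStepA (l1 l2 : List Int)
    (st : List (List Int) × List (List Int) × List (List Int) × List (List Int) × List (List Int) × List Int × Int)
    (xy : Int × Int) :
    List (List Int) × List (List Int) × List (List Int) × List (List Int) × List (List Int) × List Int × Int :=
  match st with
  | (current, original, sent_measure, sm_value, difference, totalSMArr, totalSM) =>
    let x := xy.1
    let y := xy.2
    -- l1[x]: Python raises IndexError when x ≥ len(l1) (pyGet? = none); excluded by Pre_, default y unreachable inside Pre_.
    if (PySem.List.pyGet? l1 x).getD y ≠ y then
      let res :=
        if y < 0 ∧ pvIndexZ l2 y < pvIndexZ l1 y then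
          (sent_measure ++ [[y, 2 * |pvIndexZ l2 y - pvIndexZ l1 y|]], sm_value ++ [[y, (2 : Int)]],
           totalSM + 2 * |pvIndexZ l2 y - pvIndexZ l1 y|)
        else if y < 0 ∧ pvIndexZ l2 y > pvIndexZ l1 y then
          (sent_measure ++ [[y, 1 * |pvIndexZ l2 y - pvIndexZ l1 y|]], sm_value ++ [[y, (1 : Int)]],
           totalSM + 1 * |pvIndexZ l2 y - pvIndexZ l1 y|)
        else if y > 0 ∧ pvIndexZ l2 y < pvIndexZ l1 y then
          (sent_measure ++ [[y, 1 * |pvIndexZ l2 y - pvIndexZ l1 y|]], sm_value ++ [[y, (1 : Int)]],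
           totalSM + 1 * |pvIndexZ l2 y - pvIndexZ l1 y|)
        else if y > 0 ∧ pvIndexZ l2 y > pvIndexZ l1 y then
          (sent_measure ++ [[y, 2 * |pvIndexZ l2 y - pvIndexZ l1 y|]], sm_value ++ [[y, (2 : Int)]],
           totalSM + 2 * |pvIndexZ l2 y - pvIndexZ l1 y|)
        else (sent_measure, sm_value, totalSM)
      (current ++ [[y, pvIndexZ l2 y]], original ++ [[y, pvIndexZ l1 y]], res.1, res.2.1,
       difference ++ [[y, |pvIndexZ l2 y - pvIndexZ l1 y|]], totalSMArr ++ [res.2.2], res.2.2)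
    else
      (current, original, sent_measure, sm_value, difference, totalSMArr ++ [totalSM], totalSM)

def sentimentMeasure (l1 : List Int) (l2 : List Int) (path : List Int) (dist : Int) : List Int × Int × List Int × Int :=
  let fin := (PySem.List.enumerate l2 0).foldl (pvStepA l1 l2) ([], [], [], [], [], [], 0)
  (l2, fin.2.2.2.2.2.2, path, dist)

-- ===== PORT B =====
-- counts = {}; for a, b in zip(l1, l2): if a != b: counts[b] = counts.get(b, 0) + 1
def pvCounts (l1 l2 : List Int) : PySem.Dict Int Int :=
  (l1.zip l2).foldl (fun d p => if p.1 ≠ p.2 then d.insert p.2 (d.getD p.2 0 + 1) else d) PySem.Dict.empty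

-- pos = {}; for i, v in reversed(list(enumerate(l))): pos[v] = i
def pvPos (l : List Int) : PySem.Dict Int Int :=
  (PySem.List.enumerate l 0).reverse.foldl (fun d iv => d.insert iv.2 iv.1) PySem.Dict.empty

-- loop body over counts.items(); pos1[v]/pos2[v]: Python raises KeyError when v is absent; excluded by Pre_, default 0 unreachable inside Pre_.
def pvTermB (pos1 pos2 : PySem.Dict Int Int) (t : Int) (vc : Int × Int) : Int :=
  let d := pos2.getD vc.1 0 - pos1.getD vc.1 0
  if vc.1 ≠ 0 ∧ d ≠ 0 then
    t + vc.2 * ((if decide (vc.1 < 0) = decide (d < 0) then 2 else 1) * |d|)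
  else t

def sentimentMeasure_alt (l1 : List Int) (l2 : List Int) (path : List Int) (dist : Int) : List Int × Int × List Int × Int :=
  let counts := pvCounts l1 l2
  let pos1 := pvPos l1
  let pos2 := pvPos l2
  (l2, counts.items.foldl (pvTermB pos1 pos2) 0, path, dist)

-- ===== PRECONDITION & SPEC =====
-- Exactly where A returns: A raises IndexError on l1[x] when len(l2) > len(l1), and ValueError on
-- l1.index(y) when some mismatched element of l2 is absent from l1.
def Pre_sentimentMeasure (l1 : List Int) (l2 : List Int) (path : List Int) (dist : Int) : Prop :=
  l2.length ≤ l1.length ∧ ∀ p ∈ l1.zip l2, p.1 ≠ p.2 → p.2 ∈ l1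
instance (l1 : List Int) (l2 : List Int) (path : List Int) (dist : Int) : Decidable (Pre_sentimentMeasure l1 l2 path dist) := by unfold Pre_sentimentMeasure; infer_instance

def pvWitness_sentimentMeasure : List Int × List Int × List Int × Int := ([1, -2, 3], [-2, 1, 3], [0], 4)

def Spec_sentimentMeasure (l1 : List Int) (l2 : List Int) (path : List Int) (dist : Int) (out : List Int × Int × List Int × Int) : Prop := out = sentimentMeasure_alt l1 l2 path dist
instance (l1 : List Int) (l2 : List Int) (path : List Int) (dist : Int) (out : List Int × Int × List Int × Int) : Decidable (Spec_sentimentMeasure l1 l2 path dist out) := by unfold Spec_sentimentMeasure; infer_instance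

-- ===== CLAIM (what is proved, stated in full; the proofs are below) =====
def Claim_equal_sentimentMeasure : Prop := ∀ (l1 : List Int) (l2 : List Int) (path : List Int) (dist : Int), Dom_sentimentMeasure l1 l2 path dist → Pre_sentimentMeasure l1 l2 path dist → Spec_sentimentMeasure l1 l2 path dist (sentimentMeasure l1 l2 path dist)

-- ===== LEMMAS AND PROOFS =====

-- the l2-values at mismatched positions, with multiplicity, in order
def pvMs (l1 l2 : List Int) : List Int := ((l1.zip l2).filter (fun p => decide (p.1 ≠ p.2))).map (·.2)

-- A's per-mismatch contribution, as a function of the value alone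
def pvG (l1 l2 : List Int) (y : Int) : Int :=
  if y < 0 ∧ pvIndexZ l2 y < pvIndexZ l1 y then 2 * |pvIndexZ l2 y - pvIndexZ l1 y|
  else if y < 0 ∧ pvIndexZ l2 y > pvIndexZ l1 y then 1 * |pvIndexZ l2 y - pvIndexZ l1 y|
  else if y > 0 ∧ pvIndexZ l2 y < pvIndexZ l1 y then 1 * |pvIndexZ l2 y - pvIndexZ l1 y|
  else if y > 0 ∧ pvIndexZ l2 y > pvIndexZ l1 y then 2 * |pvIndexZ l2 y - pvIndexZ l1 y|
  else 0

def pvGA (l1 l2 : List Int) (p : Int × Int) : Int :=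
  if (PySem.List.pyGet? l1 p.1).getD p.2 ≠ p.2 then pvG l1 l2 p.2 else 0

-- B's per-distinct-value contribution (unit weight)
def pvGB (pos1 pos2 : PySem.Dict Int Int) (v : Int) : Int :=
  if v ≠ 0 ∧ pos2.getD v 0 - pos1.getD v 0 ≠ 0 then
    (if decide (v < 0) = decide (pos2.getD v 0 - pos1.getD v 0 < 0) then 2 else 1) *
      |pos2.getD v 0 - pos1.getD v 0|
  else 0

theorem pvStepA_total (l1 l2 : List Int) (st : List (List Int) × List (List Int) × List (List Int) × List (List Int) × List (List Int) × List Int × Int) (p : Int × Int) :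
    (pvStepA l1 l2 st p).2.2.2.2.2.2 = st.2.2.2.2.2.2 + pvGA l1 l2 p := by
  obtain ⟨c, o, sm, sv, df, ta, t⟩ := st
  simp only [pvStepA, pvGA, pvG]
  split_ifs <;> simp

theorem pvFoldA_total (l1 l2 : List Int) (es : List (Int × Int)) (st : List (List Int) × List (List Int) × List (List Int) × List (List Int) × List (List Int) × List Int × Int) :
    (es.foldl (pvStepA l1 l2) st).2.2.2.2.2.2 = st.2.2.2.2.2.2 + (es.map (pvGA l1 l2)).sum := by
  induction es generalizing st with
  | nil => simp
  | cons p es ih => simp [ih, pvStepA_total]; ring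

-- shifting the enumerate start past a consumed head of l1
theorem pvShiftSum (G : Int → Int) (a : Int) (t1 : List Int) :
    ∀ (l : List Int) (s : Nat),
    ((PySem.List.enumerate l ((s : Int) + 1)).map
      (fun p => if (PySem.List.pyGet? (a :: t1) p.1).getD p.2 ≠ p.2 then G p.2 else 0)).sum
    = ((PySem.List.enumerate l (s : Int)).map
      (fun p => if (PySem.List.pyGet? t1 p.1).getD p.2 ≠ p.2 then G p.2 else 0)).sum := by
  intro l
  induction l with
  | nil => intro s; simp [PySem.List.enumerate_nil]
  | cons x t ih =>
    intro s
    rw [PySem.List.enumerate_cons, PySem.List.enumerate_cons, List.map_cons, List.map_cons,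
      List.sum_cons, List.sum_cons]
    have ih' := ih (s + 1)
    push_cast at ih'
    rw [PySem.List.pyGet?_cons_succ a t1 s, ih']

-- A's position-sum equals the sum over the mismatch multiset
theorem pvSumA_eq_ms (G : Int → Int) :
    ∀ (l1 l2 : List Int), l2.length ≤ l1.length →
    ((PySem.List.enumerate l2 0).map
      (fun p => if (PySem.List.pyGet? l1 p.1).getD p.2 ≠ p.2 then G p.2 else 0)).sum
    = ((pvMs l1 l2).map G).sum := by
  intro l1 l2
  induction l2 generalizing l1 with
  | nil => intro _; simp [pvMs, PySem.List.enumerate_nil]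
  | cons b t2 ih =>
    intro hlen
    cases l1 with
    | nil => simp at hlen
    | cons a t1 =>
      rw [PySem.List.enumerate_cons, List.map_cons, List.sum_cons]
      have h0 : ((0 : Int) + 1) = (((0 : Nat) : Int) + 1) := by norm_num
      rw [h0, pvShiftSum G a t1 t2 0]
      have ht : ((0 : Nat) : Int) = (0 : Int) := by norm_num
      rw [ht, ih t1 (by simpa using hlen)]
      rw [PySem.List.pyGet?_zero_cons]
      simp only [pvMs, List.zip_cons_cons, List.filter_cons]
      by_cases hab : a = b
      · subst hab; simp
      · simp [hab]

-- last-write-wins fold of key/value pairs: lookup is the last matching pair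
theorem pvFoldInsert_get? (ps : List (Int × Int)) (d : PySem.Dict Int Int) (v : Int) :
    (ps.foldl (fun d iv => d.insert iv.2 iv.1) d).get? v
    = ((ps.reverse.find? (fun iv => iv.2 == v)).map (·.1)).or (d.get? v) := by
  induction ps generalizing d with
  | nil => simp
  | cons p ps ih =>
    rw [List.foldl_cons, ih, List.reverse_cons, List.find?_append]
    cases hf : ps.reverse.find? (fun iv => iv.2 == v) with
    | some iv => simp
    | none =>
      by_cases hv : p.2 = v
      · subst hv; simp [PySem.Dict.get?_insert_self]
      · have : ¬ (p.2 == v) = true := by simpa using hv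
        simp [this, PySem.Dict.get?_insert_of_ne d p.1 (fun h => hv h.symm)]

theorem pvFind?_enumerate (v : Int) :
    ∀ (l : List Int) (s : Int),
    (PySem.List.enumerate l s).find? (fun iv => iv.2 == v)
    = (PySem.List.index? l v).map (fun n => (s + (n : Int), v)) := by
  intro l
  induction l with
  | nil => intro s; simp [PySem.List.enumerate_nil, PySem.List.index?_eq_idxOf?]
  | cons a t ih =>
    intro s
    rw [PySem.List.enumerate_cons, List.find?_cons]
    by_cases hav : a = v
    · subst hav
      rw [PySem.List.index?_cons_self]
      simp
    · have hb : (a == v) = false := beq_eq_false_iff_ne.mpr hav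
      rw [PySem.List.index?_cons_of_ne t hav, ih (s+1)]
      cases h : PySem.List.index? t v with
      | none => simp [hb]
      | some n => simp [hb]; ring

theorem pvPos_getD (l : List Int) (v : Int) (n : Nat) (h : PySem.List.index? l v = some n) :
    (pvPos l).getD v 0 = (n : Int) := by
  rw [PySem.Dict.getD_eq_get?_getD, pvPos, pvFoldInsert_get?, List.reverse_reverse,
    pvFind?_enumerate v l 0, h]
  simp

theorem pvCounts_eq_counter (l1 l2 : List Int) :
    pvCounts l1 l2 = PySem.Dict.counter (pvMs l1 l2) := by
  rw [pvCounts, pvMs]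
  refine Eq.trans (PySem.List.foldl_ite_eq_foldl_filter (fun p : Int × Int => p.1 ≠ p.2)
      (fun d p => d.insert p.2 (d.getD p.2 (0:Int) + 1)) (l1.zip l2) PySem.Dict.empty) ?_
  rw [← List.foldl_map (f := fun p : Int × Int => p.2)
      (g := fun d x => PySem.Dict.insert d x (d.getD x (0:Int) + 1)),
    PySem.Dict.foldl_insert_getD_add_one_eq_counter]

theorem pvTermB_eq_add (pos1 pos2 : PySem.Dict Int Int) (t : Int) (vc : Int × Int) :
    pvTermB pos1 pos2 t vc = t + vc.2 * pvGB pos1 pos2 vc.1 := by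
  simp only [pvTermB, pvGB]
  split_ifs <;> simp

theorem pvSumSingle (g : Int → Int) (a : Int) :
    ∀ (S : List Int), S.Nodup → a ∈ S →
    (S.map (fun k => (if k = a then (1:Int) else 0) * g k)).sum = g a := by
  intro S
  induction S with
  | nil => intro _ h; simp at h
  | cons x t ih =>
    intro hnd hmem
    rw [List.map_cons, List.sum_cons]
    by_cases hxa : x = a
    · subst hxa
      have hz : (t.map (fun k => (if k = x then (1:Int) else 0) * g k)).sum = 0 := by
        apply List.sum_eq_zero
        intro y hy
        rcases List.mem_map.mp hy with ⟨k, hk, rfl⟩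
        have hne : k ≠ x := fun he => (List.nodup_cons.mp hnd).1 (he ▸ hk)
        simp [hne]
      rw [hz]
      simp
    · have hmem' : a ∈ t := by
        rcases List.mem_cons.mp hmem with h | h
        · exact absurd h.symm hxa
        · exact h
      rw [ih (List.nodup_cons.mp hnd).2 hmem']
      simp [hxa]

-- Σ_{k ∈ Set.ofList ms} count(k) · g(k) = Σ_{m ∈ ms} g(m)
theorem pvGroupSum (g : Int → Int) (ms : List Int) :
    ((PySem.Set.ofList ms).map (fun k => ((ms.count k : Int)) * g k)).sum = (ms.map g).sum := by
  induction ms using List.reverseRecOn with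
  | nil => simp [PySem.Set.ofList]
  | append_singleton ms a ih =>
    have hset : PySem.Set.ofList (ms ++ [a]) = PySem.Set.add (PySem.Set.ofList ms) a := by
      rw [PySem.Set.ofList_eq_foldl, List.foldl_append, ← PySem.Set.ofList_eq_foldl]
      rfl
    have hcnt : ∀ k : Int, ((ms ++ [a]).count k : Int) = (ms.count k : Int) + (if k = a then 1 else 0) := by
      intro k
      rw [List.count_append]
      by_cases h : k = a
      · subst h; simp
      · have : ¬ a = k := fun he => h he.symm
        simp [h, this]
    by_cases hmem : a ∈ ms
    · rw [hset, show PySem.Set.add (PySem.Set.ofList ms) a = PySem.Set.ofList ms by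
        simp [PySem.Set.add, hmem]]
      have hsplit : ((PySem.Set.ofList ms).map (fun k => ((ms ++ [a]).count k : Int) * g k)).sum
          = ((PySem.Set.ofList ms).map (fun k => (ms.count k : Int) * g k)).sum
            + ((PySem.Set.ofList ms).map (fun k => (if k = a then (1:Int) else 0) * g k)).sum := by
        rw [← PySem.List.sum_map_add_int]
        congr 1
        apply List.map_congr_left
        intro k _
        rw [hcnt k]; ring
      rw [hsplit, ih, pvSumSingle g a (PySem.Set.ofList ms) (PySem.Set.nodup_ofList ms)
        ((PySem.Set.mem_ofList ms a).mpr hmem)]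
      simp
    · rw [hset, show PySem.Set.add (PySem.Set.ofList ms) a = PySem.Set.ofList ms ++ [a] by
        simp [PySem.Set.add, hmem]]
      rw [List.map_append, List.sum_append, List.map_cons, List.sum_cons]
      have h1 : ((PySem.Set.ofList ms).map (fun k => ((ms ++ [a]).count k : Int) * g k)).sum
          = ((PySem.Set.ofList ms).map (fun k => (ms.count k : Int) * g k)).sum := by
        congr 1
        apply List.map_congr_left
        intro k hk
        have hne : k ≠ a := fun he => hmem (he ▸ (PySem.Set.mem_ofList ms k).mp hk)
        rw [hcnt k]
        simp [hne]
      have h2 : (((ms ++ [a]).count a : Int)) = 1 := by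
        rw [hcnt a]
        simp [List.count_eq_zero.mpr hmem]
      rw [h1, ih, h2]
      simp

-- pointwise: A's contribution equals B's, for mismatched values under Pre_
theorem pvG_eq_pvGB (l1 l2 : List Int)
    (hmem : ∀ p ∈ l1.zip l2, p.1 ≠ p.2 → p.2 ∈ l1) (v : Int) (hv : v ∈ pvMs l1 l2) :
    pvG l1 l2 v = pvGB (pvPos l1) (pvPos l2) v := by
  rcases List.mem_map.mp hv with ⟨p, hpf, rfl⟩
  rcases List.mem_filter.mp hpf with ⟨hpz, hpd⟩
  have hne : p.1 ≠ p.2 := by simpa using hpd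
  have hin2 : p.2 ∈ l2 := (List.of_mem_zip hpz).2
  have hin1 : p.2 ∈ l1 := hmem p hpz hne
  obtain ⟨n1, hn1⟩ := Option.isSome_iff_exists.mp ((PySem.List.index?_isSome_iff l1 p.2).mpr hin1)
  obtain ⟨n2, hn2⟩ := Option.isSome_iff_exists.mp ((PySem.List.index?_isSome_iff l2 p.2).mpr hin2)
  have e1 : pvIndexZ l1 p.2 = (n1 : Int) := by rw [pvIndexZ, hn1]; rfl
  have e2 : pvIndexZ l2 p.2 = (n2 : Int) := by rw [pvIndexZ, hn2]; rfl
  have d1 : (pvPos l1).getD p.2 0 = (n1 : Int) := pvPos_getD l1 p.2 n1 hn1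
  have d2 : (pvPos l2).getD p.2 0 = (n2 : Int) := pvPos_getD l2 p.2 n2 hn2
  rw [pvG, pvGB, e1, e2, d1, d2]
  simp only [decide_eq_decide]
  rcases lt_trichotomy (p.2) 0 with hy | hy | hy <;>
    rcases lt_trichotomy ((n2 : Int)) ((n1 : Int)) with hn | hn | hn <;>
      split_ifs <;>
        first
        | (exfalso; omega)
        | rfl

-- ===== VERDICT (by name: the statement is the Claim_ definition above) =====
theorem sentimentMeasure_spec : Claim_equal_sentimentMeasure := by
  intro l1 l2 path dist _hdom hpre
  obtain ⟨hlen, hmem⟩ := hpre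
  show _ = _
  simp only [sentimentMeasure, sentimentMeasure_alt]
  refine Prod.ext rfl (Prod.ext ?_ rfl)
  show ((PySem.List.enumerate l2 0).foldl (pvStepA l1 l2) ([], [], [], [], [], [], 0)).2.2.2.2.2.2
      = (pvCounts l1 l2).items.foldl (pvTermB (pvPos l1) (pvPos l2)) 0
  rw [pvFoldA_total]
  have hA : ((PySem.List.enumerate l2 0).map (pvGA l1 l2)).sum
      = ((pvMs l1 l2).map (pvG l1 l2)).sum := by
    rw [show pvGA l1 l2 = (fun p => if (PySem.List.pyGet? l1 p.1).getD p.2 ≠ p.2 then pvG l1 l2 p.2 else 0) from rfl]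
    exact pvSumA_eq_ms (pvG l1 l2) l1 l2 hlen
  have hpt : (pvMs l1 l2).map (pvG l1 l2) = (pvMs l1 l2).map (pvGB (pvPos l1) (pvPos l2)) :=
    List.map_congr_left (fun v hv => pvG_eq_pvGB l1 l2 hmem v hv)
  have hB : (pvCounts l1 l2).items.foldl (pvTermB (pvPos l1) (pvPos l2)) 0
      = ((pvMs l1 l2).map (pvGB (pvPos l1) (pvPos l2))).sum := by
    rw [pvCounts_eq_counter,
        PySem.List.foldl_congr_mem _ _ _ _ (fun t vc _ => pvTermB_eq_add (pvPos l1) (pvPos l2) t vc),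
        PySem.List.foldl_add, PySem.Dict.items_counter, List.map_map]
    simpa using pvGroupSum (pvGB (pvPos l1) (pvPos l2)) (pvMs l1 l2)
  rw [hA, hpt, hB]
  ring
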